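-- pv_equiv track=rewrite | github.com/joel35/advent-of-code | 2024/09/solution.py | get_gap_map
-- ===== SOURCE A (Python) =====
-- def get_gap_map(data: list) -> dict:
--     gap_map = {}
--
--     i = 0
--     j = 1
--     while i < len(data):
--         check = data[i]
--         if not check == ".":
--             i += 1
--             continue
--
--         j = i + 1
--         while j < len(data):
--             if not data[j] == check:
--                 gap_map[i] = j - i
--                 break
--             j += 1
--
--         i = j
--     return gap_map
-- ===== SOURCE B (Python) =====
-- def get_gap_map(data: list) -> dict:
--     # single pass: close a run whenever the character changes; a trailing
--     # dot run is never closed, matching A's behaviour of not recording it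
--     gap_map = {}
--     start = 0
--     prev = None
--     for k, c in enumerate(data):
--         if c != prev:
--             if prev == ".":
--                 gap_map[start] = k - start
--             start = k
--             prev = c
--     return gap_map
-- ===== Notes on version B (the rewrite author's own statement) =====
-- stated objective: simpler
-- what changed: Replaced A's nested while loops with explicit index jumping by a single enumerate pass that closes a run whenever the character changes (a trailing dot run is naturally never closed, matching A).
import Mathlib
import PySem

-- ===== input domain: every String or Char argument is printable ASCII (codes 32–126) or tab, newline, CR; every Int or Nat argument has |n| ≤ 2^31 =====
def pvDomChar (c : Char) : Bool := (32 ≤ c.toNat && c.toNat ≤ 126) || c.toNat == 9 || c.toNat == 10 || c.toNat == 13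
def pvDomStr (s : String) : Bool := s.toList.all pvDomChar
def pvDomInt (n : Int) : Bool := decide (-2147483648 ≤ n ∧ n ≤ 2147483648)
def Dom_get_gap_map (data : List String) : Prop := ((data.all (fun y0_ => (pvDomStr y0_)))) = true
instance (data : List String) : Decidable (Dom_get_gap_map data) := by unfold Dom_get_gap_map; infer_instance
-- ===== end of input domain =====

-- B replaces A's nested index scan by a single pass that closes a run whenever
-- the character changes (objective: simpler; same return value).

-- ===== PORT A =====
-- inner while loop of A: scan j forward while data[j] == check; on the first
-- mismatch record (i, j - i) and break; returns (recorded entry, final j)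
def ggmInner (data : List String) (check : String) (i j : Nat) :
    Option (Int × Int) × Nat :=
  if h : j < data.length then
    if data[j] ≠ check then (some ((i : Int), (j : Int) - (i : Int)), j)
    else ggmInner data check i (j + 1)
  else (none, j)
termination_by data.length - j

-- needed by ggmOuter's termination proof: the inner scan never moves j backwards
theorem ggmInner_ge (data : List String) (check : String) (i : Nat) :
    ∀ j : Nat, j ≤ (ggmInner data check i j).2 := by
  intro j
  fun_induction ggmInner data check i j with
  | case1 j h hne => simp
  | case2 j h hne ih => omega
  | case3 j h => simp

-- outer while loop of A
def ggmOuter (data : List String) (gm : List (Int × Int)) (i : Nat) :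
    List (Int × Int) :=
  if h : i < data.length then
    let check := data[i]
    if check ≠ "." then ggmOuter data gm (i + 1)
    else
      let r := ggmInner data check i (i + 1)
      ggmOuter data (gm ++ r.1.toList) r.2
  else gm
termination_by data.length - i
decreasing_by
  · omega
  · have := ggmInner_ge data data[i] i (i + 1); omega

def get_gap_map (data : List String) : List (Int × Int) :=
  ggmOuter data [] 0

-- ===== PORT B =====
-- one fold step of Source B's loop body; state = (gap_map, start, prev)
def ggmStep (st : List (Int × Int) × Int × Option String) (kc : Int × String) :
    List (Int × Int) × Int × Option String :=
  if some kc.2 ≠ st.2.2 then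
    ((if st.2.2 = some "." then st.1 ++ [(st.2.1, kc.1 - st.2.1)] else st.1),
     kc.1, some kc.2)
  else st

def get_gap_map_alt (data : List String) : List (Int × Int) :=
  ((PySem.List.enumerate data 0).foldl ggmStep ([], 0, none)).1

-- ===== PRECONDITION & SPEC =====
def Spec_get_gap_map (data : List String) (out : List (Int × Int)) : Prop := out = get_gap_map_alt data
instance (data : List String) (out : List (Int × Int)) : Decidable (Spec_get_gap_map data out) := by unfold Spec_get_gap_map; infer_instance

-- ===== CLAIM (what is proved, stated in full; the proofs are below) =====
def Claim_equal_get_gap_map : Prop := ∀ (data : List String), Dom_get_gap_map data → Spec_get_gap_map data (get_gap_map data)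

-- ===== LEMMAS AND PROOFS =====

-- B's fold restricted to the suffix of data starting at index i
def ggmFold (data : List String) (i : Nat)
    (st : List (Int × Int) × Int × Option String) :
    List (Int × Int) × Int × Option String :=
  (PySem.List.enumerate (data.drop i) (i : Int)).foldl ggmStep st

theorem ggmFold_stop (data : List String) (i : Nat) (hi : data.length ≤ i)
    (st : List (Int × Int) × Int × Option String) :
    ggmFold data i st = st := by
  unfold ggmFold
  rw [List.drop_eq_nil_of_le hi]
  simp [PySem.List.enumerate]

theorem ggmFold_cons (data : List String) (i : Nat) (h : i < data.length)
    (st : List (Int × Int) × Int × Option String) :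
    ggmFold data i st = ggmFold data (i + 1) (ggmStep st ((i : Int), data[i])) := by
  unfold ggmFold
  rw [List.drop_eq_getElem_cons h, PySem.List.enumerate_cons]
  simp only [List.foldl_cons]
  norm_num

theorem ggmOuter_stop (data : List String) (gm : List (Int × Int)) (i : Nat)
    (hi : data.length ≤ i) : ggmOuter data gm i = gm := by
  unfold ggmOuter; rw [dif_neg (by omega)]

-- the main invariant: B's fold from position i simulates A's outer loop
-- (first clause: outside a dot run; second: inside a dot run started at i0)
theorem ggm_main (data : List String) :
    ∀ (k i : Nat), data.length - i ≤ k →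
      (∀ gm s p, p ≠ some "." → (ggmFold data i (gm, s, p)).1 = ggmOuter data gm i) ∧
      (∀ gm (i0 : Nat),
        (ggmFold data i (gm, (i0 : Int), some ".")).1 =
          ggmOuter data (gm ++ (ggmInner data "." i0 i).1.toList)
            (ggmInner data "." i0 i).2) := by
  intro k
  induction k with
  | zero =>
    intro i hik
    have hi : data.length ≤ i := by omega
    constructor
    · intro gm s p _
      rw [ggmFold_stop data i hi, ggmOuter_stop data gm i hi]
    · intro gm i0
      rw [ggmFold_stop data i hi]
      rw [ggmInner.eq_def]
      rw [dif_neg (by omega)]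
      simp [ggmOuter_stop data _ i hi]
  | succ k ih =>
    intro i hik
    by_cases h : i < data.length
    case neg =>
      have hi : data.length ≤ i := by omega
      constructor
      · intro gm s p _
        rw [ggmFold_stop data i hi, ggmOuter_stop data gm i hi]
      · intro gm i0
        rw [ggmFold_stop data i hi]
        rw [ggmInner.eq_def]
        rw [dif_neg (by omega)]
        simp [ggmOuter_stop data _ i hi]
    case pos =>
      have ih' := ih (i + 1) (by omega)
      constructor
      · intro gm s p hp
        rw [ggmFold_cons data i h]
        by_cases hd : data[i] = "."
        · -- A enters the inner scan; B opens a dot run at start = i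
          have hstep : ggmStep (gm, s, p) ((i : Int), data[i]) =
              (gm, (i : Int), some ".") := by
            unfold ggmStep
            rw [if_pos (by simp [hd]; intro hc; exact hp hc.symm)]
            simp [if_neg hp, hd]
          rw [hstep]
          have h2 := ih'.2 gm i
          rw [h2]
          conv_rhs => unfold ggmOuter
          rw [dif_pos h]
          simp only [hd, if_neg (by simp : ¬("." ≠ "."))]
        · -- non-dot element: both sides just advance
          conv_rhs => unfold ggmOuter
          rw [dif_pos h, if_pos hd]
          by_cases hc : some data[i] = p
          · have hstep : ggmStep (gm, s, p) ((i : Int), data[i]) = (gm, s, p) := by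
              unfold ggmStep; rw [if_neg (by simpa using hc)]
            rw [hstep]; exact ih'.1 gm s p hp
          · have hstep : ggmStep (gm, s, p) ((i : Int), data[i]) =
                (gm, (i : Int), some data[i]) := by
              unfold ggmStep
              rw [if_pos (by simpa using hc)]
              simp [if_neg hp]
            rw [hstep]
            exact ih'.1 gm (i : Int) (some data[i]) (by simp [hd])
      · intro gm i0
        rw [ggmFold_cons data i h]
        by_cases hd : data[i] = "."
        · -- still inside the dot run: B's step is a no-op, A's inner recurses
          have hstep : ggmStep (gm, (i0 : Int), some ".") ((i : Int), data[i]) =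
              (gm, (i0 : Int), some ".") := by
            unfold ggmStep; rw [if_neg (by simp [hd])]
          rw [hstep]
          have h2 := ih'.2 gm i0
          rw [h2]
          conv_rhs => rw [ggmInner.eq_def]
          rw [dif_pos h, if_neg (by simp [hd])]
        · -- run ends here: B records (i0, i - i0); A's inner breaks with the same entry
          have hstep : ggmStep (gm, (i0 : Int), some ".") ((i : Int), data[i]) =
              (gm ++ [((i0 : Int), (i : Int) - (i0 : Int))], (i : Int), some data[i]) := by
            unfold ggmStep
            rw [if_pos (by simp [hd])]
            simp
          rw [hstep]
          have h1 := ih'.1 (gm ++ [((i0 : Int), (i : Int) - (i0 : Int))])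
            (i : Int) (some data[i]) (by simp [hd])
          rw [h1]
          conv_rhs => rw [ggmInner.eq_def]
          rw [dif_pos h, if_pos (by simpa using hd)]
          simp only [Option.toList_some]
          conv_rhs => unfold ggmOuter
          rw [dif_pos h, if_pos hd]

-- ===== VERDICT (by name: the statement is the Claim_ definition above) =====
theorem get_gap_map_spec : Claim_equal_get_gap_map := by
  intro data _
  unfold Spec_get_gap_map get_gap_map get_gap_map_alt
  have h := (ggm_main data (data.length) 0 (by omega)).1 [] 0 none (by simp)
  unfold ggmFold at h
  simpa using h.symm
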